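-- pv_equiv track=rewrite | github.com/fa18kouki/WirelessAgent_R1 | WA_DS_V3_KB.py | apply_heuristic_bandwidth
-- ===== SOURCE A (Python) =====
-- def apply_heuristic_bandwidth(slice_type, request, min_bandwidth, max_bandwidth):
--     """Apply heuristic rules to determine bandwidth based on request type"""
--     request_lower = request.lower()
--
--     if slice_type == "eMBB":
--         # For eMBB, use more bandwidth for video/streaming, less for other applications
--         if any(keyword in request_lower for keyword in ["video", "stream", "watch", "movie", "4k", "8k"]):
--             return min(max_bandwidth, 15)  # High bandwidth for video
--         elif any(keyword in request_lower for keyword in ["download", "file", "upload"]):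
--             return min(max_bandwidth, 12)  # Medium-high for downloads
--         elif any(keyword in request_lower for keyword in ["conference", "meeting", "call"]):
--             return min(max_bandwidth, 10)  # Medium for video conferencing
--         else:
--             return min(max_bandwidth, 8)  # Medium for other eMBB applications
--     else:  # URLLC
--         # For URLLC, use more bandwidth for critical applications
--         if any(keyword in request_lower for keyword in ["surgery", "medical", "emergency"]):
--             return min(max_bandwidth, 5)  # Max for critical applications
--         elif any(keyword in request_lower for keyword in ["control", "automation", "robot"]):
--             return min(max_bandwidth, 3)  # Medium for control applications
--         else:
--             return min(max_bandwidth, 2)  # Minimum for other URLLC applications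
-- ===== SOURCE B (Python) =====
-- # Different aggregation: instead of an ordered first-match cascade, score the
-- # request by taking the MAX weight over all matching keywords of a flat
-- # keyword->weight map (correct because the tiers strictly decrease, so the
-- # first matching tier is exactly the maximum matching weight).
-- _EMBB_WEIGHTS = {
--     "video": 15, "stream": 15, "watch": 15, "movie": 15, "4k": 15, "8k": 15,
--     "download": 12, "file": 12, "upload": 12,
--     "conference": 10, "meeting": 10, "call": 10,
-- }
-- _URLLC_WEIGHTS = {
--     "surgery": 5, "medical": 5, "emergency": 5,
--     "control": 3, "automation": 3, "robot": 3,
-- }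
--
-- def apply_heuristic_bandwidth(slice_type, request, min_bandwidth, max_bandwidth):
--     request_lower = request.lower()
--     if slice_type == "eMBB":
--         cap, weights = 8, _EMBB_WEIGHTS
--     else:
--         cap, weights = 2, _URLLC_WEIGHTS
--     for keyword, weight in weights.items():
--         if keyword in request_lower:
--             cap = max(cap, weight)
--     return min(max_bandwidth, cap)
-- ===== Notes on version B (the rewrite author's own statement) =====
-- stated objective: alternative
-- what changed: Replaced the ordered if/elif first-match cascade by an order-independent max-aggregation: a flat keyword->weight map is scanned once and the cap is the maximum weight of any matching keyword (default as the starting accumulator), correct because the tiers strictly decrease.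
import Mathlib
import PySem

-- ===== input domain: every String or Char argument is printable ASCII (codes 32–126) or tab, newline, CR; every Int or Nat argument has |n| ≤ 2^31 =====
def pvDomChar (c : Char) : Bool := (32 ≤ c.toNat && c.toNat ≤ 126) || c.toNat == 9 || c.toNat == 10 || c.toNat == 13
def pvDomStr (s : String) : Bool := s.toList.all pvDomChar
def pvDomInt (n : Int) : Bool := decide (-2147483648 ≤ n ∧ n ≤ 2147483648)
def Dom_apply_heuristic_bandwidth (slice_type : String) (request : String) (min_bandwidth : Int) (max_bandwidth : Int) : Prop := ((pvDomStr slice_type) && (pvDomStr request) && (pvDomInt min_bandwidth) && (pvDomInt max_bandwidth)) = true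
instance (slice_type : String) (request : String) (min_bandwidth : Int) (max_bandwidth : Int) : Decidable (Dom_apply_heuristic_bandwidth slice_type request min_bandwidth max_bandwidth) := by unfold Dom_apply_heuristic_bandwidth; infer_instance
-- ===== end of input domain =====

-- B replaces A's ordered first-match if/elif cascade by an order-independent max-aggregation
-- over a flat keyword->weight map (correct since the tiers strictly decrease); objective: alternative.
-- ===== PORT A =====
def apply_heuristic_bandwidth (slice_type : String) (request : String) (min_bandwidth : Int) (max_bandwidth : Int) : Int :=
  let request_lower := PySem.Str.lower request
  let _ := min_bandwidth
  if slice_type == "eMBB" then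
    if ["video", "stream", "watch", "movie", "4k", "8k"].any (fun k => PySem.Str.isIn k request_lower) then
      min max_bandwidth 15
    else if ["download", "file", "upload"].any (fun k => PySem.Str.isIn k request_lower) then
      min max_bandwidth 12
    else if ["conference", "meeting", "call"].any (fun k => PySem.Str.isIn k request_lower) then
      min max_bandwidth 10
    else
      min max_bandwidth 8
  else
    if ["surgery", "medical", "emergency"].any (fun k => PySem.Str.isIn k request_lower) then
      min max_bandwidth 5
    else if ["control", "automation", "robot"].any (fun k => PySem.Str.isIn k request_lower) then
      min max_bandwidth 3
    else
      min max_bandwidth 2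

-- ===== PORT B =====
def pvEmbbWeights : List (String × Int) :=
  [("video", 15), ("stream", 15), ("watch", 15), ("movie", 15), ("4k", 15), ("8k", 15),
   ("download", 12), ("file", 12), ("upload", 12),
   ("conference", 10), ("meeting", 10), ("call", 10)]

def pvUrllcWeights : List (String × Int) :=
  [("surgery", 5), ("medical", 5), ("emergency", 5),
   ("control", 3), ("automation", 3), ("robot", 3)]

def apply_heuristic_bandwidth_alt (slice_type : String) (request : String) (min_bandwidth : Int) (max_bandwidth : Int) : Int :=
  let request_lower := PySem.Str.lower request
  let _ := min_bandwidth
  let start : Int × List (String × Int) :=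
    if slice_type == "eMBB" then (8, pvEmbbWeights) else (2, pvUrllcWeights)
  let cap := start.2.foldl
    (fun acc kw => if PySem.Str.isIn kw.1 request_lower then max acc kw.2 else acc) start.1
  min max_bandwidth cap

-- ===== PRECONDITION & SPEC =====
def Spec_apply_heuristic_bandwidth (slice_type : String) (request : String) (min_bandwidth : Int) (max_bandwidth : Int) (out : Int) : Prop := out = apply_heuristic_bandwidth_alt slice_type request min_bandwidth max_bandwidth
instance (slice_type : String) (request : String) (min_bandwidth : Int) (max_bandwidth : Int) (out : Int) : Decidable (Spec_apply_heuristic_bandwidth slice_type request min_bandwidth max_bandwidth out) := by unfold Spec_apply_heuristic_bandwidth; infer_instance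

-- ===== CLAIM =====
def Claim_equal_apply_heuristic_bandwidth : Prop := ∀ (slice_type : String) (request : String) (min_bandwidth : Int) (max_bandwidth : Int), Dom_apply_heuristic_bandwidth slice_type request min_bandwidth max_bandwidth → Spec_apply_heuristic_bandwidth slice_type request min_bandwidth max_bandwidth (apply_heuristic_bandwidth slice_type request min_bandwidth max_bandwidth)

-- ===== LEMMAS AND PROOFS =====
-- folding a constant-weight keyword block computes 'if any keyword matches then max acc c else acc'
theorem pv_fold_const (r : String) (c : Int) (ks : List String) (a : Int) :
    (ks.map (fun k => (k, c))).foldl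
      (fun acc kw => if PySem.Str.isIn kw.1 r then max acc kw.2 else acc) a
    = if ks.any (fun k => PySem.Str.isIn k r) then max a c else a := by
  induction ks generalizing a with
  | nil => simp
  | cons k ks ih =>
    simp only [List.map_cons, List.foldl_cons, List.any_cons, Bool.or_eq_true]
    by_cases h : PySem.Str.isIn k r = true
    · rw [if_pos h, ih]
      have : (PySem.Str.isIn k r = true ∨ (ks.any fun k => PySem.Str.isIn k r) = true) := Or.inl h
      rw [if_pos this]
      split_ifs <;> omega
    · rw [if_neg h, ih]
      by_cases h2 : (ks.any fun k => PySem.Str.isIn k r) = true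
      · rw [if_pos h2, if_pos (Or.inr h2)]
      · rw [if_neg h2, if_neg (by tauto)]

-- ===== VERDICT =====
theorem apply_heuristic_bandwidth_spec : Claim_equal_apply_heuristic_bandwidth := by
  intro slice_type request min_bandwidth max_bandwidth _
  unfold Spec_apply_heuristic_bandwidth apply_heuristic_bandwidth apply_heuristic_bandwidth_alt
  by_cases h : slice_type == "eMBB"
  · have he : pvEmbbWeights =
        (["video", "stream", "watch", "movie", "4k", "8k"].map (fun k => (k, (15 : Int)))) ++
        (["download", "file", "upload"].map (fun k => (k, (12 : Int)))) ++
        (["conference", "meeting", "call"].map (fun k => (k, (10 : Int)))) := rfl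
    simp only [h, if_pos, he, List.foldl_append, pv_fold_const]
    by_cases h1 : ["video", "stream", "watch", "movie", "4k", "8k"].any
        (fun k => PySem.Str.isIn k (PySem.Str.lower request)) <;>
      by_cases h2 : ["download", "file", "upload"].any
        (fun k => PySem.Str.isIn k (PySem.Str.lower request)) <;>
      by_cases h3 : ["conference", "meeting", "call"].any
        (fun k => PySem.Str.isIn k (PySem.Str.lower request)) <;>
      (simp_all; try omega)
  · have hu : pvUrllcWeights =
        (["surgery", "medical", "emergency"].map (fun k => (k, (5 : Int)))) ++
        (["control", "automation", "robot"].map (fun k => (k, (3 : Int)))) := rfl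
    simp only [h, if_neg, Bool.false_eq_true, not_false_iff, hu, List.foldl_append, pv_fold_const]
    by_cases h1 : ["surgery", "medical", "emergency"].any
        (fun k => PySem.Str.isIn k (PySem.Str.lower request)) <;>
      by_cases h2 : ["control", "automation", "robot"].any
        (fun k => PySem.Str.isIn k (PySem.Str.lower request)) <;>
      (simp_all; try omega)
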